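-- pv_equiv track=rewrite | github.com/ishanshah001/amazon_30 | max_num_books.py | maxBooksCollected
-- ===== SOURCE A (Python) =====
-- from typing import List
--
-- def maxBooksCollected(books: List[int]) -> int:
--     n = len(books)
--     # Adjusted values: makes "decreasing by 1" rule easier to handle
--     adjusted = [books[i] - i for i in range(n)]
--
--     # Step 1: Find left boundaries using a monotonic stack
--     left_bound = [-1] * n
--     stack = []
--     for i, val in enumerate(adjusted):
--         while stack and adjusted[stack[-1]] >= val:
--             stack.pop()
--         if stack:
--             left_bound[i] = stack[-1]
--         stack.append(i)
--
--     # Step 2: DP to compute max books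
--     dp = [0] * n
--     max_books = 0
--
--     for i in range(n):
--         # Max number of books we can take at i (limited by slope & left bound)
--         length = min(books[i], i - left_bound[i])
--
--         first = books[i] - length + 1 #first book in the series
--
--         # Sum of decreasing stack: arithmetic series
--         # (1 + 100)//2 * 50
--         segment_sum = (first + books[i]) * length // 2
--
--         # Combine with best from left side if it exists
--         dp[i] = segment_sum if left_bound[i] == -1 else segment_sum + dp[left_bound[i]]
--         max_books = max(max_books, dp[i])
--
--     return max_books
-- ===== SOURCE B (Python) =====
-- from typing import List
--
-- def maxBooksCollected(books: List[int]) -> int: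
--     # No monotonic stack: the previous strictly-smaller adjusted index is found
--     # by jumping along already-computed prev pointers; dp/prev are lists grown
--     # by append.
--     n = len(books)
--     prev = []
--     dp = []
--     best = 0
--     for i in range(n):
--         b = books[i]
--         j = i - 1
--         while j >= 0 and books[j] - j >= b - i:
--             j = prev[j]
--         length = min(b, i - j)
--         series = (2 * b - length + 1) * length // 2
--         cur = series + (dp[j] if j >= 0 else 0)
--         prev.append(j)
--         dp.append(cur)
--         best = max(best, cur)
--     return best
-- ===== Notes on version B (the rewrite author's own statement) =====
-- stated objective: alternative
-- what changed: Replaces A's monotonic index stack and its separate adjusted/left_bound arrays and second DP pass by a single loop that finds each previous strictly-smaller adjusted index by jumping along already-computed prev pointers and extends dp/prev lists by append.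
import Mathlib
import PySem

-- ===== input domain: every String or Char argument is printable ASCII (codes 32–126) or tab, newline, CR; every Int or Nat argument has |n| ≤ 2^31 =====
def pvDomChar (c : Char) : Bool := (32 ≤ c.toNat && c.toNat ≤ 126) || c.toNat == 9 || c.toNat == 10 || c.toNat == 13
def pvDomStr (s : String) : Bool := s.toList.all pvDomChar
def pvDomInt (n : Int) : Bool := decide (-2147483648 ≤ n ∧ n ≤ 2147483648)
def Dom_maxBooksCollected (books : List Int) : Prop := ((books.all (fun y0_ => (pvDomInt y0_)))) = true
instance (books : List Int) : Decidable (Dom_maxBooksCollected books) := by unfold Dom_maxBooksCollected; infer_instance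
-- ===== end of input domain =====

-- B replaces A's monotonic stack by prev-pointer jumping: the previous strictly smaller
-- adjusted index is found by following already-computed prev links (objective: alternative).

-- ===== PORT A =====
-- while stack and adjusted[stack[-1]] >= val: stack.pop()   (stack top = list head)
def pvPopA (adjusted : List Int) (val : Int) : List Int → List Int
  | [] => []
  | j :: rest =>
    if val ≤ PySem.List.pyGetD adjusted j 0 then pvPopA adjusted val rest else j :: rest

-- one iteration of A's first loop (p = (i, val) from enumerate(adjusted))
def pvStep1 (adjusted : List Int) (st : List Int × List Int) (p : Int × Int) :
    List Int × List Int :=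
  let stk := pvPopA adjusted p.2 st.2
  match stk with
  | [] => (st.1, p.1 :: stk)
  | j :: _ => (PySem.List.pySetD st.1 p.1 j, p.1 :: stk)

-- one iteration of A's second loop (i from range(n)); lbF is the finished left_bound list
def pvStep2 (books lbF : List Int) (st : List Int × Int) (i : Int) : List Int × Int :=
  let lbi := PySem.List.pyGetD lbF i (-1)
  let bi := PySem.List.pyGetD books i 0
  let len := min bi (i - lbi)
  let first := bi - len + 1
  let seg := PySem.Int.floordiv ((first + bi) * len) 2
  let dpi := if lbi = -1 then seg else seg + PySem.List.pyGetD st.1 lbi 0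
  (PySem.List.pySetD st.1 i dpi, max st.2 dpi)

def maxBooksCollected (books : List Int) : Int :=
  let n : Int := (books.length : Int)
  let adjusted : List Int := (PySem.List.pyRange 0 n 1).map (fun i => PySem.List.pyGetD books i 0 - i)
  let s1 := (PySem.List.enumerate adjusted).foldl (pvStep1 adjusted)
    (List.replicate books.length (-1), [])
  let s2 := (PySem.List.pyRange 0 n 1).foldl (pvStep2 books s1.1)
    (List.replicate books.length 0, 0)
  s2.2

-- ===== PORT B =====
-- while j >= 0 and books[j] - j >= v: j = prev[j].
-- The Int loop variable strictly decreases on each jump (prev entries built by the loop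
-- are smaller than their index), so fuel i+1 is never exhausted on the loop's own states.
def pvJump (books prevL : List Int) (v : Int) : Nat → Int → Int
  | 0, j => j
  | f + 1, j =>
    if 0 ≤ j ∧ v ≤ PySem.List.pyGetD books j 0 - j then
      pvJump books prevL v f (PySem.List.pyGetD prevL j 0)
    else j

-- one iteration of B's single loop (i from range(n)); state = (prev, dp, best)
def pvStepB (books : List Int) (st : List Int × List Int × Int) (i : Int) :
    List Int × List Int × Int :=
  let b := PySem.List.pyGetD books i 0
  let j := pvJump books st.1 (b - i) (i.toNat + 1) (i - 1)
  let len := min b (i - j)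
  let series := PySem.Int.floordiv ((2 * b - len + 1) * len) 2
  let cur := series + (if 0 ≤ j then PySem.List.pyGetD st.2.1 j 0 else 0)
  (st.1 ++ [j], st.2.1 ++ [cur], max st.2.2 cur)

def maxBooksCollected_alt (books : List Int) : Int :=
  ((PySem.List.pyRange 0 (books.length : Int) 1).foldl (pvStepB books) ([], [], 0)).2.2

-- ===== PRECONDITION & SPEC =====
def Spec_maxBooksCollected (books : List Int) (out : Int) : Prop := out = maxBooksCollected_alt books
instance (books : List Int) (out : Int) : Decidable (Spec_maxBooksCollected books out) := by unfold Spec_maxBooksCollected; infer_instance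

-- ===== CLAIM (what is proved, stated in full; the proofs are below) =====
def Claim_equal_maxBooksCollected : Prop := ∀ (books : List Int), Dom_maxBooksCollected books → Spec_maxBooksCollected books (maxBooksCollected books)

-- ===== LEMMAS AND PROOFS =====

-- adjusted list of A
def pvAdjL (books : List Int) : List Int :=
  (PySem.List.pyRange 0 (books.length : Int) 1).map (fun i => PySem.List.pyGetD books i 0 - i)

-- A's first loop after k iterations
def pvA1 (books : List Int) (k : Nat) : List Int × List Int :=
  ((PySem.List.pyRange 0 (k : Int) 1).map (fun j => (j, PySem.List.pyGetD (pvAdjL books) j 0))).foldl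
    (pvStep1 (pvAdjL books)) (List.replicate books.length (-1), [])

-- A's second loop after k iterations (using the finished left_bound list)
def pvA2 (books : List Int) (k : Nat) : List Int × Int :=
  (PySem.List.pyRange 0 (k : Int) 1).foldl (pvStep2 books (pvA1 books books.length).1)
    (List.replicate books.length 0, 0)

-- B's loop after k iterations
def pvB2 (books : List Int) (k : Nat) : List Int × List Int × Int :=
  (PySem.List.pyRange 0 (k : Int) 1).foldl (pvStepB books) ([], [], 0)

-- the 'previous strictly smaller adjusted index below k' spec, as a backward scan
def pvScan (books : List Int) (v : Int) : Nat → Int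
  | 0 => -1
  | k + 1 =>
    if v ≤ PySem.List.pyGetD books (k : Int) 0 - (k : Int) then pvScan books v k else (k : Int)

def pvTop : List Int → Int
  | [] => -1
  | j :: _ => j

theorem pvA1_succ (books : List Int) (k : Nat) :
    pvA1 books (k + 1) =
      pvStep1 (pvAdjL books) (pvA1 books k) ((k : Int), PySem.List.pyGetD (pvAdjL books) (k : Int) 0) := by
  unfold pvA1
  rw [show ((k + 1 : Nat) : Int) = (k : Int) + 1 by push_cast; ring,
    PySem.List.pyRange_one_succ_right (by positivity), List.map_append, List.foldl_append]
  rfl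

theorem pvA2_succ (books : List Int) (k : Nat) :
    pvA2 books (k + 1) =
      pvStep2 books (pvA1 books books.length).1 (pvA2 books k) (k : Int) := by
  unfold pvA2
  rw [show ((k + 1 : Nat) : Int) = (k : Int) + 1 by push_cast; ring,
    PySem.List.pyRange_one_succ_right (by positivity), List.foldl_append]
  rfl

theorem pvB2_succ (books : List Int) (k : Nat) :
    pvB2 books (k + 1) = pvStepB books (pvB2 books k) (k : Int) := by
  unfold pvB2
  rw [show ((k + 1 : Nat) : Int) = (k : Int) + 1 by push_cast; ring,
    PySem.List.pyRange_one_succ_right (by positivity), List.foldl_append]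
  rfl

theorem pvAdjL_get (books : List Int) (i : Int) (h0 : 0 ≤ i) (h1 : i < (books.length : Int)) :
    PySem.List.pyGetD (pvAdjL books) i 0 = PySem.List.pyGetD books i 0 - i := by
  unfold pvAdjL
  rw [PySem.List.pyGetD_map_pyRange_of_nonneg _ _ _ _ h0 h1]

theorem pvA1_len (books : List Int) (k : Nat) :
    (pvA1 books k).1.length = books.length := by
  induction k with
  | zero => simp [pvA1]
  | succ k ih =>
    rw [pvA1_succ]
    unfold pvStep1
    cases pvPopA (pvAdjL books) (PySem.List.pyGetD (pvAdjL books) (k : Int) 0) (pvA1 books k).2 with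
    | nil => simpa using ih
    | cons j rest => simpa [PySem.List.length_pySetD] using ih

theorem pvA2_len (books : List Int) (k : Nat) :
    (pvA2 books k).1.length = books.length := by
  induction k with
  | zero => simp [pvA2]
  | succ k ih =>
    rw [pvA2_succ]
    unfold pvStep2
    simpa [PySem.List.length_pySetD] using ih

theorem pvGetSet_ne (xs : List Int) (n : Nat) (i : Int) (v d : Int) (hn : n < xs.length)
    (h0 : 0 ≤ i) (hne : i ≠ (n : Int)) :
    PySem.List.pyGetD (PySem.List.pySetD xs (n : Int) v) i d = PySem.List.pyGetD xs i d := by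
  obtain ⟨m, rfl⟩ : ∃ m : Nat, i = (m : Int) := ⟨i.toNat, (Int.toNat_of_nonneg h0).symm⟩
  rw [PySem.List.pyGetD_pySetD_natCast _ _ _ _ _ hn, if_neg (by exact_mod_cast hne)]

theorem pvGetSet_eq (xs : List Int) (n : Nat) (v d : Int) (hn : n < xs.length) :
    PySem.List.pyGetD (PySem.List.pySetD xs (n : Int) v) (n : Int) d = v := by
  rw [PySem.List.pyGetD_pySetD_natCast _ _ _ _ _ hn, if_pos rfl]

-- left_bound positions at or above the cursor are still -1
theorem pvA1_lb_hi (books : List Int) (k : Nat) :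
    ∀ i : Int, (k : Int) ≤ i → PySem.List.pyGetD (pvA1 books k).1 i (-1) = -1 := by
  induction k with
  | zero =>
    intro i hi
    by_cases h : PySem.Raise.InRange (pvA1 books 0).1.length i
    · have := PySem.List.pyGetD_mem (xs := (pvA1 books 0).1) (i := i) (d := -1) h
      have hrep : (pvA1 books 0).1 = List.replicate books.length (-1) := by
        simp [pvA1]
      rw [hrep] at this
      exact List.eq_of_mem_replicate this
    · exact PySem.List.pyGetD_of_none _ _ _ ((PySem.List.pyGet?_eq_none_iff _ _).mpr h)
  | succ k ih =>
    intro i hi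
    rw [pvA1_succ]
    unfold pvStep1
    rcases hs : pvPopA (pvAdjL books) (PySem.List.pyGetD (pvAdjL books) (k : Int) 0) (pvA1 books k).2 with _ | ⟨t, rest⟩
    · exact ih i (by omega)
    · simp only []
      by_cases hk : k < books.length
      · rw [pvGetSet_ne _ k i _ _ (by rw [pvA1_len]; exact hk) (by omega) (by omega)]
        exact ih i (by omega)
      · have hid : PySem.List.pySetD (pvA1 books k).1 (k : Int) t = (pvA1 books k).1 := by
          rw [PySem.List.pySetD_natCast]
          exact List.set_eq_of_length_le (by rw [pvA1_len]; omega)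
        rw [hid]
        exact ih i (by omega)

-- reading any position other than the one just written is unchanged (out-of-range writes are no-ops)
theorem pvSet_get_other (xs : List Int) (n : Nat) (i : Int) (v d : Int)
    (h0 : 0 ≤ i) (hne : i ≠ (n : Int)) :
    PySem.List.pyGetD (PySem.List.pySetD xs (n : Int) v) i d = PySem.List.pyGetD xs i d := by
  by_cases hn : n < xs.length
  · exact pvGetSet_ne xs n i v d hn h0 hne
  · rw [PySem.List.pySetD_natCast, List.set_eq_of_length_le (by omega)]

theorem pvA1_lb_stable (books : List Int) (k m : Nat) (hkm : k ≤ m) :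
    ∀ i : Int, 0 ≤ i → i < (k : Int) →
      PySem.List.pyGetD (pvA1 books m).1 i (-1) = PySem.List.pyGetD (pvA1 books k).1 i (-1) := by
  induction m, hkm using Nat.le_induction with
  | base => intro i _ _; rfl
  | succ m hkm ih =>
    intro i h0 hik
    rw [pvA1_succ]
    unfold pvStep1
    rcases pvPopA (pvAdjL books) (PySem.List.pyGetD (pvAdjL books) (m : Int) 0) (pvA1 books m).2 with _ | ⟨t, rest⟩
    · exact ih i h0 hik
    · simp only []
      rw [pvSet_get_other _ _ _ _ _ h0 (by omega)]
      exact ih i h0 hik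

theorem pvA2_dp_stable (books : List Int) (k m : Nat) (hkm : k ≤ m) :
    ∀ i : Int, 0 ≤ i → i < (k : Int) →
      PySem.List.pyGetD (pvA2 books m).1 i 0 = PySem.List.pyGetD (pvA2 books k).1 i 0 := by
  induction m, hkm using Nat.le_induction with
  | base => intro i _ _; rfl
  | succ m hkm ih =>
    intro i h0 hik
    rw [pvA2_succ]
    unfold pvStep2
    simp only []
    rw [pvSet_get_other _ _ _ _ _ h0 (by omega)]
    exact ih i h0 hik

-- the value pass 1 writes into left_bound[k]
theorem pvA1_lb_write (books : List Int) (k : Nat) (hk : k < books.length) :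
    PySem.List.pyGetD (pvA1 books (k + 1)).1 (k : Int) (-1) =
      pvTop (pvPopA (pvAdjL books) (PySem.List.pyGetD (pvAdjL books) (k : Int) 0) (pvA1 books k).2) := by
  rw [pvA1_succ]
  unfold pvStep1
  rcases pvPopA (pvAdjL books) (PySem.List.pyGetD (pvAdjL books) (k : Int) 0) (pvA1 books k).2 with _ | ⟨t, rest⟩
  · exact pvA1_lb_hi books k (k : Int) le_rfl
  · exact pvGetSet_eq _ _ _ _ (by rw [pvA1_len]; exact hk)

-- the finished left_bound[k] is determined by pass 1's step k
theorem pvA1_lbF (books : List Int) (k : Nat) (hk : k < books.length) :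
    PySem.List.pyGetD (pvA1 books books.length).1 (k : Int) (-1) =
      pvTop (pvPopA (pvAdjL books) (PySem.List.pyGetD (pvAdjL books) (k : Int) 0) (pvA1 books k).2) := by
  rw [← pvA1_lb_write books k hk]
  exact pvA1_lb_stable books (k + 1) books.length hk (k : Int) (by positivity) (by push_cast; omega)

-- popping with a lower threshold after a higher one is popping with the lower one
theorem pvPopA_comp (adjL : List Int) (v w : Int) (hvw : v ≤ w) :
    ∀ s : List Int, pvPopA adjL v (pvPopA adjL w s) = pvPopA adjL v s := by
  intro s
  induction s with
  | nil => rfl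
  | cons t rest ih =>
    by_cases h : w ≤ PySem.List.pyGetD adjL t 0
    · rw [show pvPopA adjL w (t :: rest) = pvPopA adjL w rest by simp only [pvPopA, if_pos h], ih,
        show pvPopA adjL v (t :: rest) = pvPopA adjL v rest by simp only [pvPopA, if_pos (le_trans hvw h)]]
    · rw [show pvPopA adjL w (t :: rest) = t :: rest by simp only [pvPopA, if_neg h]]

-- the new stack after step k is k :: (the popped old stack)
theorem pvA1_stack_succ (books : List Int) (k : Nat) :
    (pvA1 books (k + 1)).2 =
      (k : Int) :: pvPopA (pvAdjL books) (PySem.List.pyGetD (pvAdjL books) (k : Int) 0) (pvA1 books k).2 := by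
  rw [pvA1_succ]
  unfold pvStep1
  rcases pvPopA (pvAdjL books) (PySem.List.pyGetD (pvAdjL books) (k : Int) 0) (pvA1 books k).2 with _ | ⟨t, rest⟩ <;> rfl

-- pvScan results: either -1 or a genuine index below k
theorem pvScan_cases (books : List Int) (v : Int) (k : Nat) :
    pvScan books v k = -1 ∨ (0 ≤ pvScan books v k ∧ pvScan books v k < (k : Int)) := by
  induction k with
  | zero => left; rfl
  | succ k ih =>
    by_cases h : v ≤ PySem.List.pyGetD books (k : Int) 0 - (k : Int)
    · rw [show pvScan books v (k + 1) = pvScan books v k by simp only [pvScan, if_pos h]]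
      rcases ih with h1 | h1
      · left; exact h1
      · right; push_cast; omega
    · rw [show pvScan books v (k + 1) = (k : Int) by simp only [pvScan, if_neg h]]
      right; constructor <;> [positivity; push_cast] <;> omega

-- every index strictly between the scan result and k fails the stop condition
theorem pvScan_skip (books : List Int) (v : Int) (k : Nat) :
    ∀ m : Nat, pvScan books v k < (m : Int) → m < k →
      v ≤ PySem.List.pyGetD books (m : Int) 0 - (m : Int) := by
  induction k with
  | zero => intro m _ hm; omega
  | succ k ih =>
    intro m h1 h2
    by_cases h : v ≤ PySem.List.pyGetD books (k : Int) 0 - (k : Int)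
    · rw [show pvScan books v (k + 1) = pvScan books v k by simp only [pvScan, if_pos h]] at h1
      by_cases hmk : m = k
      · subst hmk; exact h
      · exact ih m h1 (by omega)
    · rw [show pvScan books v (k + 1) = (k : Int) by simp only [pvScan, if_neg h]] at h1
      omega

-- scanning skips a block on which the condition holds everywhere
theorem pvScan_congr (books : List Int) (v : Int) (a b : Nat) (hab : a ≤ b)
    (h : ∀ t : Nat, a ≤ t → t < b → v ≤ PySem.List.pyGetD books (t : Int) 0 - (t : Int)) :
    pvScan books v b = pvScan books v a := by
  induction b, hab using Nat.le_induction with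
  | base => rfl
  | succ b hab ih =>
    rw [show pvScan books v (b + 1) = pvScan books v b by
      simp only [pvScan, if_pos (h b hab (by omega))]]
    exact ih (fun t ht1 ht2 => h t ht1 (by omega))

-- A's stack, popped at any threshold v, has the scan result on top
theorem pvStack_scan (books : List Int) (k : Nat) (hk : k ≤ books.length) (v : Int) :
    pvTop (pvPopA (pvAdjL books) v (pvA1 books k).2) = pvScan books v k := by
  induction k with
  | zero =>
    have h0 : (pvA1 books 0).2 = [] := by simp [pvA1]
    rw [h0]; rfl
  | succ k ih =>
    have hk' : k < books.length := by omega
    have hadj : PySem.List.pyGetD (pvAdjL books) (k : Int) 0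
        = PySem.List.pyGetD books (k : Int) 0 - (k : Int) :=
      pvAdjL_get books _ (by positivity) (by exact_mod_cast hk')
    rw [pvA1_stack_succ]
    by_cases h : v ≤ PySem.List.pyGetD books (k : Int) 0 - (k : Int)
    · rw [show pvPopA (pvAdjL books) v ((k : Int) :: pvPopA (pvAdjL books) (PySem.List.pyGetD (pvAdjL books) (k : Int) 0) (pvA1 books k).2)
          = pvPopA (pvAdjL books) v (pvPopA (pvAdjL books) (PySem.List.pyGetD (pvAdjL books) (k : Int) 0) (pvA1 books k).2) by
        simp only [pvPopA, if_pos (hadj ▸ h)]]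
      rw [pvPopA_comp _ v _ (by rw [hadj]; exact h), ih (by omega),
        show pvScan books v (k + 1) = pvScan books v k by simp only [pvScan, if_pos h]]
    · rw [show pvPopA (pvAdjL books) v ((k : Int) :: pvPopA (pvAdjL books) (PySem.List.pyGetD (pvAdjL books) (k : Int) 0) (pvA1 books k).2)
          = (k : Int) :: pvPopA (pvAdjL books) (PySem.List.pyGetD (pvAdjL books) (k : Int) 0) (pvA1 books k).2 by
        simp only [pvPopA, if_neg (hadj ▸ h)]]
      rw [show pvScan books v (k + 1) = (k : Int) by simp only [pvScan, if_neg h]]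
      rfl

-- B's jump loop computes the scan, given genuine prev pointers
theorem pvJump_scan (books prevL : List Int)
    (hprev : ∀ m : Nat, m < prevL.length →
      PySem.List.pyGetD prevL (m : Int) 0 =
        pvScan books (PySem.List.pyGetD books (m : Int) 0 - (m : Int)) m)
    (v : Int) :
    ∀ (fuel : Nat) (j : Int), -1 ≤ j → j < (prevL.length : Int) →
      j - pvScan books v ((j + 1).toNat) < (fuel : Int) →
      pvJump books prevL v fuel j = pvScan books v ((j + 1).toNat) := by
  intro fuel
  induction fuel with
  | zero =>
    intro j h1 h2 h3
    exfalso
    rcases pvScan_cases books v ((j + 1).toNat) with h | h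
    · omega
    · have : ((((j : Int) + 1).toNat : Nat) : Int) ≤ j + 1 := by omega
      omega
  | succ f ih =>
    intro j h1 h2 h3
    by_cases hc : 0 ≤ j ∧ v ≤ PySem.List.pyGetD books j 0 - j
    · obtain ⟨m, rfl⟩ : ∃ m : Nat, j = (m : Int) := ⟨j.toNat, (Int.toNat_of_nonneg hc.1).symm⟩
      have hm : m < prevL.length := by exact_mod_cast h2
      have hscan_m := pvScan_cases books (PySem.List.pyGetD books (m : Int) 0 - (m : Int)) m
      set j' := pvScan books (PySem.List.pyGetD books (m : Int) 0 - (m : Int)) m with hj'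
      -- all t with j' < t < m satisfy the condition for v
      have hcongr : pvScan books v m = pvScan books v ((j' + 1).toNat) := by
        apply pvScan_congr books v ((j' + 1).toNat) m (by omega)
        intro t ht1 ht2
        have htj' : j' < (t : Int) := by omega
        have := pvScan_skip books (PySem.List.pyGetD books (m : Int) 0 - (m : Int)) m t htj' ht2
        exact le_trans hc.2 this
      have hm1 : pvScan books v (((m : Int) + 1).toNat) = pvScan books v m := by
        rw [show (((m : Int) + 1).toNat) = m + 1 by omega]
        simp only [pvScan, if_pos hc.2]
      rw [show pvJump books prevL v (f + 1) (m : Int)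
          = pvJump books prevL v f (PySem.List.pyGetD prevL (m : Int) 0) by
        simp only [pvJump, if_pos hc], hprev m hm, ← hj']
      rw [hm1, hcongr]
      rw [ih j' (by omega) (by omega) (by rw [← hcongr, ← hm1] at *; omega)]
    · rw [show pvJump books prevL v (f + 1) j = j by simp only [pvJump, if_neg hc]]
      by_cases hj : 0 ≤ j
      · have hc2 : ¬ v ≤ PySem.List.pyGetD books j 0 - j := fun h => hc ⟨hj, h⟩
        obtain ⟨m, rfl⟩ : ∃ m : Nat, j = (m : Int) := ⟨j.toNat, (Int.toNat_of_nonneg hj).symm⟩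
        rw [show (((m : Int) + 1).toNat) = m + 1 by omega]
        simp only [pvScan, if_neg hc2]
      · have hj1 : j = -1 := by omega
        subst hj1
        rfl

-- the dp value A's pass 2 computes at index k
def pvDpi (books : List Int) (k : Nat) : Int :=
  let lbi := PySem.List.pyGetD (pvA1 books books.length).1 (k : Int) (-1)
  let bi := PySem.List.pyGetD books (k : Int) 0
  let len := min bi ((k : Int) - lbi)
  let seg := PySem.Int.floordiv ((bi - len + 1 + bi) * len) 2
  if lbi = -1 then seg else seg + PySem.List.pyGetD (pvA2 books k).1 lbi 0

theorem pvStep2_eval (books : List Int) (k : Nat) :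
    pvStep2 books (pvA1 books books.length).1 (pvA2 books k) (k : Int) =
      (PySem.List.pySetD (pvA2 books k).1 (k : Int) (pvDpi books k),
        max (pvA2 books k).2 (pvDpi books k)) := rfl

theorem pvDpF (books : List Int) (k : Nat) (hk : k < books.length) :
    PySem.List.pyGetD (pvA2 books books.length).1 (k : Int) 0 = pvDpi books k := by
  rw [pvA2_dp_stable books (k + 1) books.length hk (k : Int) (by positivity) (by push_cast; omega),
    pvA2_succ, pvStep2_eval]
  exact pvGetSet_eq _ _ _ _ (by rw [pvA2_len]; exact hk)

-- lookup in a range-map list at a natCast index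
theorem pvGet_rangeMap (f : Nat → Int) (k m : Nat) (hm : m < k) (d : Int) :
    PySem.List.pyGetD ((List.range k).map f) (m : Int) d = f m := by
  rw [PySem.List.pyGetD_natCast]
  rw [List.getD_eq_getElem?_getD]
  simp [hm]

-- the main invariant: B's prev/dp lists are the scan values / A's finished dp, best agrees
theorem pvMain (books : List Int) (k : Nat) (hk : k ≤ books.length) :
    (pvB2 books k).1 =
      (List.range k).map (fun m : Nat => pvScan books (PySem.List.pyGetD books (m : Int) 0 - (m : Int)) m) ∧
    (pvB2 books k).2.1 =
      (List.range k).map (fun m : Nat => PySem.List.pyGetD (pvA2 books books.length).1 (m : Int) 0) ∧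
    (pvB2 books k).2.2 = (pvA2 books k).2 := by
  induction k with
  | zero => refine ⟨?_, ?_, ?_⟩ <;> simp [pvB2, pvA2]
  | succ k ih0 =>
    have hk' : k < books.length := by omega
    obtain ⟨ihp, ihd, ihb⟩ := ih0 (by omega)
    have hkc : (k : Int) < (books.length : Int) := by exact_mod_cast hk'
    set b := PySem.List.pyGetD books (k : Int) 0 with hb
    set v := b - (k : Int) with hv
    -- the jump at step k computes pvScan v k
    have hjump : pvJump books (pvB2 books k).1 v ((k : Int).toNat + 1) ((k : Int) - 1)
        = pvScan books v k := by
      have hlen : ((pvB2 books k).1.length : Int) = (k : Int) := by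
        rw [ihp]; simp
      have := pvJump_scan books (pvB2 books k).1
        (by
          intro m hm
          rw [ihp] at hm ⊢
          simp only [List.length_map, List.length_range] at hm
          exact pvGet_rangeMap _ k m hm 0)
        v ((k : Int).toNat + 1) ((k : Int) - 1) (by omega) (by omega)
        (by
          rcases pvScan_cases books v (((k : Int) - 1 + 1).toNat) with h | h <;> omega)
      rw [this, show (((k : Int) - 1 + 1).toNat) = k by omega]
    -- A's left bound at k is the same scan value
    have hlb : PySem.List.pyGetD (pvA1 books books.length).1 (k : Int) (-1) = pvScan books v k := by
      rw [pvA1_lbF books k hk',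
        pvAdjL_get books (k : Int) (by positivity) hkc, ← hb, ← hv,
        pvStack_scan books k (by omega) v]
    set j := pvScan books v k with hj
    -- B's cur equals A's dp value at k
    have hexp : pvDpi books k =
        (if j = -1 then
          PySem.Int.floordiv ((b - min b ((k : Int) - j) + 1 + b) * min b ((k : Int) - j)) 2
        else
          PySem.Int.floordiv ((b - min b ((k : Int) - j) + 1 + b) * min b ((k : Int) - j)) 2 +
            PySem.List.pyGetD (pvA2 books k).1 j 0) := by
      unfold pvDpi
      rw [hlb]
    have hcur :
        PySem.Int.floordiv ((2 * b - min b ((k : Int) - j) + 1) * min b ((k : Int) - j)) 2 +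
          (if 0 ≤ j then PySem.List.pyGetD (pvB2 books k).2.1 j 0 else 0) = pvDpi books k := by
      rw [hexp,
        show (b - min b ((k : Int) - j) + 1 + b) = (2 * b - min b ((k : Int) - j) + 1) from by ring]
      rcases pvScan_cases books v k with hcase | hcase
      · rw [← hj] at hcase
        rw [hcase]
        norm_num
      · rw [← hj] at hcase
        rw [if_pos hcase.1, if_neg (by omega : ¬ j = -1)]
        congr 1
        obtain ⟨m, hm⟩ : ∃ m : Nat, j = (m : Int) := ⟨j.toNat, (Int.toNat_of_nonneg hcase.1).symm⟩
        have hmk : m < k := by omega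
        rw [ihd, hm, pvGet_rangeMap _ k m hmk 0,
          pvA2_dp_stable books k books.length (by omega) (m : Int) (by positivity) (by omega)]
    refine ⟨?_, ?_, ?_⟩
    · rw [pvB2_succ]
      show (pvB2 books k).1 ++ [pvJump books (pvB2 books k).1
          (PySem.List.pyGetD books (k : Int) 0 - (k : Int)) ((k : Int).toNat + 1) ((k : Int) - 1)] = _
      rw [← hb, ← hv, hjump, ihp, List.range_succ, List.map_append]
      rfl
    · rw [pvB2_succ]
      show (pvB2 books k).2.1 ++ [_] = _
      rw [List.range_succ, List.map_append, ← ihd]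
      congr 1
      show [_] = [PySem.List.pyGetD (pvA2 books books.length).1 (k : Int) 0]
      rw [pvDpF books k hk']
      congr 1
      rw [← hb, ← hv, hjump]
      exact hcur
    · rw [pvB2_succ, pvA2_succ, pvStep2_eval]
      show max (pvB2 books k).2.2 _ = max (pvA2 books k).2 (pvDpi books k)
      rw [ihb]
      congr 1
      rw [← hb, ← hv, hjump]
      exact hcur

theorem portA_eq (books : List Int) : maxBooksCollected books = (pvA2 books books.length).2 := by
  have hlen : PySem.List.len (pvAdjL books) = (books.length : Int) := by
    simp [pvAdjL, PySem.List.len, PySem.List.length_pyRange_one]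
  show (List.foldl
      (pvStep2 books
        (List.foldl (pvStep1 (pvAdjL books)) (List.replicate books.length (-1), [])
          (PySem.List.enumerate (pvAdjL books))).1)
      (List.replicate books.length 0, 0) (PySem.List.pyRange 0 (books.length : Int) 1)).2 = _
  rw [PySem.List.enumerate_eq_map_pyRange (pvAdjL books) 0, hlen]
  rfl

theorem portB_eq (books : List Int) : maxBooksCollected_alt books = (pvB2 books books.length).2.2 := rfl

-- ===== VERDICT (by name: the statement is the Claim_ definition above) =====
theorem maxBooksCollected_spec : Claim_equal_maxBooksCollected := by
  intro books _
  show _ = _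
  rw [portA_eq, portB_eq, (pvMain books books.length le_rfl).2.2]
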